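-- pv_equiv track=rewrite | github.com/MrBrantCode/unitest_baseline | mut_generate/mist_train_cf/cf_92747/solution.py | find_shortest_subsequence
-- ===== SOURCE A (Python) =====
-- def find_shortest_subsequence(string, word1, word2):
--     # Initialize word pointers
--     word1_pos = -1
--     word2_pos = -1
--     # Initialize minimum subsequence length
--     min_length = float('inf')
--     # Initialize minimum subsequence
--     min_subsequence = ""
--     # Iterate through the string character by character
--     for i in range(len(string)):
--         # If the current character matches word1, update word1 position
--         if string[i:i+len(word1)] == word1:
--             word1_pos = i
--         # If the current character matches word2, update word2 position
--         if string[i:i+len(word2)] == word2: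
--             word2_pos = i
--         # If both word pointers have been updated, calculate subsequence length
--         if word1_pos != -1 and word2_pos != -1:
--             subsequence_length = max(word1_pos, word2_pos) - min(word1_pos, word2_pos) + len(word2)
--             # Update minimum subsequence length if necessary
--             if subsequence_length < min_length:
--                 min_length = subsequence_length
--                 min_subsequence = string[min(word1_pos, word2_pos):max(word1_pos, word2_pos) + len(word2)]
--     # Return the shortest subsequence found
--     return min_subsequence
-- ===== SOURCE B (Python) =====
-- def find_shortest_subsequence(string, word1, word2):
--     n = len(string)
--
--     def occurrences(word):
--         # all start indices i < n where string[i:i+len(word)] == word,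
--         # found with C-level str.find instead of slicing at every index
--         pos = []
--         start = 0
--         while True:
--             i = string.find(word, start)
--             if i == -1 or i >= n:
--                 break
--             pos.append(i)
--             start = i + 1
--         return pos
--
--     p1 = occurrences(word1)
--     p2 = occurrences(word2)
--
--     # merge the two sorted position lists into one ordered event stream
--     events = []
--     i1 = i2 = 0
--     while i1 < len(p1) or i2 < len(p2):
--         a = p1[i1] if i1 < len(p1) else None
--         b = p2[i2] if i2 < len(p2) else None
--         if b is None or (a is not None and a < b):
--             events.append((a, True, False)); i1 += 1
--         elif a is None or b < a:
--             events.append((b, False, True)); i2 += 1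
--         else:
--             events.append((a, True, True)); i1 += 1; i2 += 1
--
--     w1 = w2 = -1
--     min_len = None
--     best = ""
--     for i, h1, h2 in events:
--         if h1:
--             w1 = i
--         if h2:
--             w2 = i
--         if w1 != -1 and w2 != -1:
--             lo, hi = (w1, w2) if w1 <= w2 else (w2, w1)
--             length = hi - lo + len(word2)
--             if min_len is None or length < min_len:
--                 min_len = length
--                 best = string[lo:hi + len(word2)]
--     return best
-- ===== Notes on version B (the rewrite author's own statement) =====
-- stated objective: faster
-- what changed: Instead of slicing-and-comparing both words at every index of the string, B finds all occurrence positions of each word with str.find, merges the two sorted position lists into one event stream and runs the same pointer/length bookkeeping only at those events.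
import Mathlib
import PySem

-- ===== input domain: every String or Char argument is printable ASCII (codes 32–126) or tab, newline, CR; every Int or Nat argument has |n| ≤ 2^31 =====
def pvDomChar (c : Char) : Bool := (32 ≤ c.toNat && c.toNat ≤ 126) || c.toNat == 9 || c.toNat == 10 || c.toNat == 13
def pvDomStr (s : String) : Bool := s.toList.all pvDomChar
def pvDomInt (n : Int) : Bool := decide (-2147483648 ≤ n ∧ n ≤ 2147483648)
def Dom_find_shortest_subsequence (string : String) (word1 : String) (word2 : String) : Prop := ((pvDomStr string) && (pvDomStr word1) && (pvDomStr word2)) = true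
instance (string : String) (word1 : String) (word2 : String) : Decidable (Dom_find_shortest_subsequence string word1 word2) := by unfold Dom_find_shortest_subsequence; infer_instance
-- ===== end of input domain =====

-- B replaces A's slice-and-compare of both words at EVERY index by find-based occurrence
-- lists merged into one event stream; the pointer/length bookkeeping runs only at events.

-- ===== PORT A =====
-- loop body of A: state = (word1_pos, word2_pos, min_length (none = inf), min_subsequence)
def fssStepA (s w1 w2 : List Char) (acc : Int × Int × Option Int × List Char) (i : Nat) :
    Int × Int × Option Int × List Char :=
  -- string[i:i+len(w)] == w  ported as  (s.drop i).take w.length = w  (exact: PySem.List.slice_natCast_add)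
  let p1 : Int := if (s.drop i).take w1.length = w1 then (i : Int) else acc.1
  let p2 : Int := if (s.drop i).take w2.length = w2 then (i : Int) else acc.2.1
  if p1 ≠ -1 ∧ p2 ≠ -1 then
    let len : Int := max p1 p2 - min p1 p2 + (w2.length : Int)
    if (match acc.2.2.1 with | none => true | some m => decide (len < m)) = true then
      (p1, p2, some len, PySem.List.slice s (some (min p1 p2)) (some (max p1 p2 + (w2.length : Int))))
    else (p1, p2, acc.2.2.1, acc.2.2.2)
  else (p1, p2, acc.2.2.1, acc.2.2.2)

def find_shortest_subsequence (string : String) (word1 : String) (word2 : String) : String :=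
  let s := string.toList
  let st := (List.range s.length).foldl (fssStepA s word1.toList word2.toList) (-1, -1, none, [])
  String.ofList st.2.2.2

-- ===== PORT B =====
-- the while-loop of Source B's `occurrences`: next = string.find(word, start); stop at -1 or ≥ n
def fssOcc (s w : List Char) (start : Nat) : List Nat :=
  if hs : s.length < start then []   -- totality guard only: Python's find returns -1 here
  else
    let i := PySem.Chars.findFrom s w (start : Int) none
    if hi : i = -1 ∨ (s.length : Int) ≤ i then []
    else i.toNat :: fssOcc s w (i.toNat + 1)
termination_by s.length + 1 - start
decreasing_by
  have hk : start ≤ s.length := le_of_not_gt hs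
  have hspec := PySem.Chars.findFrom_natCast_spec s w start hk (by
    intro h; exact hi (Or.inl h))
  have h1 : (start : Int) ≤ i := hspec.1
  have h0 : (0:Int) ≤ i := le_trans (by exact_mod_cast Nat.zero_le start) h1
  omega

-- the index-based merge of the two sorted position lists into events (i, hit1, hit2)
def fssMerge : List Nat → List Nat → List (Nat × Bool × Bool)
  | [], [] => []
  | a :: p1, [] => (a, true, false) :: fssMerge p1 []
  | [], b :: p2 => (b, false, true) :: fssMerge [] p2
  | a :: p1, b :: p2 =>
    if a < b then (a, true, false) :: fssMerge p1 (b :: p2)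
    else if b < a then (b, false, true) :: fssMerge (a :: p1) p2
    else (a, true, true) :: fssMerge p1 p2

-- loop body of Source B's final for-loop over events
def fssStepB (s : List Char) (L2 : Nat) (acc : Int × Int × Option Int × List Char)
    (ev : Nat × Bool × Bool) : Int × Int × Option Int × List Char :=
  let p1 : Int := if ev.2.1 then (ev.1 : Int) else acc.1
  let p2 : Int := if ev.2.2 then (ev.1 : Int) else acc.2.1
  if p1 ≠ -1 ∧ p2 ≠ -1 then
    let lohi : Int × Int := if p1 ≤ p2 then (p1, p2) else (p2, p1)
    let len : Int := lohi.2 - lohi.1 + (L2 : Int)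
    if (match acc.2.2.1 with | none => true | some m => decide (len < m)) = true then
      (p1, p2, some len, PySem.List.slice s (some lohi.1) (some (lohi.2 + (L2 : Int))))
    else (p1, p2, acc.2.2.1, acc.2.2.2)
  else (p1, p2, acc.2.2.1, acc.2.2.2)

def find_shortest_subsequence_alt (string : String) (word1 : String) (word2 : String) : String :=
  let s := string.toList
  let p1 := fssOcc s word1.toList 0
  let p2 := fssOcc s word2.toList 0
  let st := (fssMerge p1 p2).foldl (fssStepB s word2.toList.length) (-1, -1, none, [])
  String.ofList st.2.2.2

-- ===== PRECONDITION & SPEC =====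
def Spec_find_shortest_subsequence (string : String) (word1 : String) (word2 : String) (out : String) : Prop := out = find_shortest_subsequence_alt string word1 word2
instance (string : String) (word1 : String) (word2 : String) (out : String) : Decidable (Spec_find_shortest_subsequence string word1 word2 out) := by unfold Spec_find_shortest_subsequence; infer_instance

-- ===== CLAIM (what is proved, stated in full; the proofs are below) =====
def Claim_equal_find_shortest_subsequence : Prop := ∀ (string : String) (word1 : String) (word2 : String), Dom_find_shortest_subsequence string word1 word2 → Spec_find_shortest_subsequence string word1 word2 (find_shortest_subsequence string word1 word2)

-- ===== LEMMAS AND PROOFS =====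

-- "string[i:i+len(w)] == w" as a Bool predicate on the index
def fssMatch (s w : List Char) (i : Nat) : Bool := decide ((s.drop i).take w.length = w)


lemma fss_filter_congr (P : Nat → Bool) (n a m : Nat) (ham : a ≤ m)
    (hmin : ∀ j, a ≤ j → j < m → P j = false) :
    (List.range n).filter (fun j => decide (a ≤ j) && P j)
      = (List.range n).filter (fun j => decide (m ≤ j) && P j) := by
  apply List.filter_congr
  intro j _
  by_cases hj : m ≤ j
  · simp [hj, le_trans ham hj]
  · by_cases haj : a ≤ j
    · simp [hj, haj, hmin j haj (lt_of_not_ge hj)]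
    · simp [hj, haj]

lemma fss_filter_head (P : Nat → Bool) (n m : Nat) (hmn : m < n) (hPm : P m = true) :
    (List.range n).filter (fun j => decide (m ≤ j) && P j)
      = m :: (List.range n).filter (fun j => decide (m + 1 ≤ j) && P j) := by
  induction n with
  | zero => omega
  | succ n ih =>
    rw [List.range_succ, List.filter_append, List.filter_append]
    rcases Nat.lt_or_ge m n with h | h
    · rw [ih h]
      have : ∀ (Q : Nat → Bool), List.filter Q [n] = if Q n then [n] else [] := by
        intro Q; simp [List.filter]; cases Q n <;> simp
      simp only [this]
      have h1 : decide (m ≤ n) = true := by simp; omega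
      have h2 : decide (m + 1 ≤ n) = true := by simp; omega
      rw [h1, h2]; simp
    · have hm : m = n := by omega
      subst hm
      have e1 : (List.range m).filter (fun j => decide (m ≤ j) && P j) = [] := by
        apply List.filter_eq_nil_iff.mpr
        intro j hj; simp at hj ⊢; omega
      have e2 : (List.range m).filter (fun j => decide (m + 1 ≤ j) && P j) = [] := by
        apply List.filter_eq_nil_iff.mpr
        intro j hj; simp at hj ⊢; omega
      rw [e1, e2]
      simp [List.filter, hPm]

lemma fssMatch_iff (s w : List Char) (i : Nat) : fssMatch s w i = true ↔ w <+: s.drop i := by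
  simp [fssMatch, List.prefix_iff_eq_take, eq_comm]

lemma fssOcc_eq (s w : List Char) (start : Nat) :
    fssOcc s w start = (List.range s.length).filter (fun i => decide (start ≤ i) && fssMatch s w i) := by
  induction start using fssOcc.induct s w with
  | case1 start hs =>
    rw [fssOcc]; simp only [dif_pos hs]
    symm; apply List.filter_eq_nil_iff.mpr
    intro j hj; simp at hj ⊢; intro h; omega
  | case2 start hs ival hi =>
    rw [fssOcc]; simp only [dif_neg hs]; rw [dif_pos hi]
    have hk : start ≤ s.length := le_of_not_gt hs
    symm; apply List.filter_eq_nil_iff.mpr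
    intro j hj; simp only [List.mem_range] at hj
    simp only [Bool.and_eq_true, decide_eq_true_eq, fssMatch_iff, not_and]
    intro hsj hpre
    rcases hi with hi | hi
    · have := (PySem.Chars.findFrom_natCast_eq_neg_one_iff s w start hk).mp hi
      apply this
      have : List.drop j s = List.drop (j - start) (List.drop start s) := by
        rw [List.drop_drop]; congr 1; omega
      rw [this] at hpre
      exact hpre.isInfix.trans (List.drop_suffix _ _).isInfix
    · have hne : PySem.Chars.findFrom s w (start:Int) ≠ -1 := by
        intro h
        have : ((-1:Int)) = PySem.Chars.findFrom s w (start:Int) := h.symm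
        omega
      have hspec := PySem.Chars.findFrom_natCast_spec s w start hk hne
      exact hspec.2.2 j hsj (by omega) hpre
  | case3 start hs ival hi ih =>
    rw [fssOcc]; simp only [dif_neg hs]; rw [dif_neg hi]
    rw [ih]
    have hk : start ≤ s.length := le_of_not_gt hs
    have hne : PySem.Chars.findFrom s w (start:Int) ≠ -1 := fun h => hi (Or.inl h)
    have hlen : ¬ ((s.length:Int) ≤ PySem.Chars.findFrom s w (start:Int)) := fun h => hi (Or.inr h)
    have hspec := PySem.Chars.findFrom_natCast_spec s w start hk hne
    set i := PySem.Chars.findFrom s w (start:Int) with hidef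
    have hge : (start:Int) ≤ i := hspec.1
    have hlt : i.toNat < s.length := by omega
    have hstart_le : start ≤ i.toNat := by omega
    rw [fss_filter_congr (fssMatch s w) s.length start i.toNat hstart_le
      (fun j haj hjm => by
        have hnp := hspec.2.2 j haj (by omega)
        rw [Bool.eq_false_iff]
        intro hb; exact hnp ((fssMatch_iff s w j).mp hb))]
    rw [fss_filter_head (fssMatch s w) s.length i.toNat hlt
      ((fssMatch_iff s w i.toNat).mpr hspec.2.1)]

lemma fssMerge_nil_right (p1 : List Nat) : fssMerge p1 [] = p1.map (fun a => (a, true, false)) := by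
  induction p1 with
  | nil => rw [fssMerge]; rfl
  | cons a p1 ih => rw [fssMerge, ih]; rfl

lemma fssMerge_nil_left (p2 : List Nat) : fssMerge [] p2 = p2.map (fun b => (b, false, true)) := by
  induction p2 with
  | nil => rw [fssMerge]; rfl
  | cons b p2 ih => rw [fssMerge, ih]; rfl

lemma fssMerge_app_left (p1 p2 : List Nat) (n : Nat) (h2 : ∀ x ∈ p2, x < n) :
    fssMerge (p1 ++ [n]) p2 = fssMerge p1 p2 ++ [(n, true, false)] := by
  induction p1, p2 using fssMerge.induct with
  | case1 => simp [fssMerge_nil_right]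
  | case2 a p1 ih => simp [fssMerge_nil_right]
  | case3 b p2 ih =>
    have hb : b < n := h2 b (by simp)
    simp only [List.nil_append, fssMerge]
    rw [if_neg (by omega), if_pos hb]
    have := ih (fun x hx => h2 x (List.mem_cons_of_mem _ hx))
    simp only [List.nil_append] at this
    rw [this]
    all_goals simp
  | case4 a p1 b p2 hab ih =>
    simp only [List.cons_append, fssMerge, if_pos hab]
    rw [ih (fun x hx => h2 x hx)]
  | case5 a p1 b p2 hab hba ih =>
    simp only [List.cons_append, fssMerge, if_neg hab, if_pos hba]
    have := ih (fun x hx => h2 x (List.mem_cons_of_mem _ hx))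
    simp only [List.cons_append] at this
    rw [this]
  | case6 a p1 b p2 hab hba ih =>
    simp only [List.cons_append, fssMerge, if_neg hab, if_neg hba]
    rw [ih (fun x hx => h2 x (List.mem_cons_of_mem _ hx))]

lemma fssMerge_app_right (p1 p2 : List Nat) (n : Nat) (h1 : ∀ x ∈ p1, x < n) :
    fssMerge p1 (p2 ++ [n]) = fssMerge p1 p2 ++ [(n, false, true)] := by
  induction p1, p2 using fssMerge.induct with
  | case1 => simp [fssMerge_nil_left]
  | case2 a p1 ih =>
    have ha : a < n := h1 a (by simp)
    simp only [List.nil_append, fssMerge]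
    rw [if_pos ha]
    have := ih (fun x hx => h1 x (List.mem_cons_of_mem _ hx))
    simp only [List.nil_append] at this
    rw [this]
    all_goals simp
  | case3 b p2 ih =>
    simp [fssMerge_nil_left]
  | case4 a p1 b p2 hab ih =>
    simp only [List.cons_append, fssMerge, if_pos hab]
    have := ih (fun x hx => h1 x (List.mem_cons_of_mem _ hx))
    simp only [List.cons_append] at this
    rw [this]
  | case5 a p1 b p2 hab hba ih =>
    simp only [List.cons_append, fssMerge, if_neg hab, if_pos hba]
    rw [ih (fun x hx => h1 x hx)]
  | case6 a p1 b p2 hab hba ih =>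
    simp only [List.cons_append, fssMerge, if_neg hab, if_neg hba]
    rw [ih (fun x hx => h1 x (List.mem_cons_of_mem _ hx))]

lemma fssMerge_app_both (p1 p2 : List Nat) (n : Nat) (h1 : ∀ x ∈ p1, x < n) (h2 : ∀ x ∈ p2, x < n) :
    fssMerge (p1 ++ [n]) (p2 ++ [n]) = fssMerge p1 p2 ++ [(n, true, true)] := by
  induction p1, p2 using fssMerge.induct with
  | case1 =>
    simp only [List.nil_append]
    rw [fssMerge]
    simp [fssMerge]
  | case2 a p1 ih =>
    have ha : a < n := h1 a (by simp)
    simp only [List.cons_append, List.nil_append, fssMerge, if_pos ha]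
    have := ih (fun x hx => h1 x (List.mem_cons_of_mem _ hx)) h2
    simp only [List.nil_append] at this
    rw [this]
  | case3 b p2 ih =>
    have hb : b < n := h2 b (by simp)
    simp only [List.nil_append, List.cons_append, fssMerge]
    rw [if_neg (by omega), if_pos hb]
    have := ih h1 (fun x hx => h2 x (List.mem_cons_of_mem _ hx))
    simp only [List.nil_append] at this
    rw [this]
  | case4 a p1 b p2 hab ih =>
    simp only [List.cons_append, fssMerge, if_pos hab]
    have := ih (fun x hx => h1 x (List.mem_cons_of_mem _ hx)) (fun x hx => h2 x hx)
    simp only [List.cons_append] at this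
    rw [this]
  | case5 a p1 b p2 hab hba ih =>
    simp only [List.cons_append, fssMerge, if_neg hab, if_pos hba]
    have := ih (fun x hx => h1 x hx) (fun x hx => h2 x (List.mem_cons_of_mem _ hx))
    simp only [List.cons_append] at this
    rw [this]
  | case6 a p1 b p2 hab hba ih =>
    simp only [List.cons_append, fssMerge, if_neg hab, if_neg hba]
    rw [ih (fun x hx => h1 x (List.mem_cons_of_mem _ hx)) (fun x hx => h2 x (List.mem_cons_of_mem _ hx))]

lemma fssMerge_filters (m1 m2 : Nat → Bool) (n : Nat) :
    fssMerge ((List.range n).filter m1) ((List.range n).filter m2)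
      = ((List.range n).filter (fun i => m1 i || m2 i)).map (fun i => (i, m1 i, m2 i)) := by
  induction n with
  | zero => simp only [List.range_zero, List.filter_nil, List.map_nil]; rw [fssMerge]
  | succ n ih =>
    have hb1 : ∀ x ∈ (List.range n).filter m1, x < n := by
      intro x hx; have := List.mem_range.mp (List.mem_of_mem_filter hx); omega
    have hb2 : ∀ x ∈ (List.range n).filter m2, x < n := by
      intro x hx; have := List.mem_range.mp (List.mem_of_mem_filter hx); omega
    rw [List.range_succ, List.filter_append, List.filter_append, List.filter_append]
    by_cases hm1 : m1 n = true <;> by_cases hm2 : m2 n = true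
    · simp only [List.filter, hm1, hm2]
      rw [fssMerge_app_both _ _ n hb1 hb2, ih]
      simp [hm1, hm2]
    · have hm2' : m2 n = false := by simpa using hm2
      simp only [List.filter, hm1, hm2']
      rw [List.append_nil, fssMerge_app_left _ _ n hb2, ih]
      simp [hm1, hm2']
    · have hm1' : m1 n = false := by simpa using hm1
      simp only [List.filter, hm1', hm2]
      rw [List.append_nil, fssMerge_app_right _ _ n hb1, ih]
      simp [hm1', hm2]
    · have hm1' : m1 n = false := by simpa using hm1
      have hm2' : m2 n = false := by simpa using hm2
      simp [List.filter, hm1', hm2', ih]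

-- common tail of the two loop bodies: (lo,hi) selection equals min/max
lemma fssTail_eq (s : List Char) (L2 : Nat) (p1 p2 : Int) (ml : Option Int) (ms : List Char) :
    (if p1 ≠ -1 ∧ p2 ≠ -1 then
        let lohi : Int × Int := if p1 ≤ p2 then (p1, p2) else (p2, p1)
        let len : Int := lohi.2 - lohi.1 + (L2 : Int)
        if (match ml with | none => true | some m => decide (len < m)) = true then
          (p1, p2, some len, PySem.List.slice s (some lohi.1) (some (lohi.2 + (L2 : Int))))
        else (p1, p2, ml, ms)
      else (p1, p2, ml, ms))
    = (if p1 ≠ -1 ∧ p2 ≠ -1 then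
        let len : Int := max p1 p2 - min p1 p2 + (L2 : Int)
        if (match ml with | none => true | some m => decide (len < m)) = true then
          (p1, p2, some len, PySem.List.slice s (some (min p1 p2)) (some (max p1 p2 + (L2 : Int))))
        else (p1, p2, ml, ms)
      else (p1, p2, ml, ms)) := by
  rcases le_or_gt p1 p2 with h | h
  · simp [min_eq_left h, max_eq_right h, if_pos h]
  · simp [min_eq_right (le_of_lt h), max_eq_left (le_of_lt h), if_neg (not_le.mpr h)]

-- one B-event does what A's body does at that index
lemma fssStepB_eq_stepA (s w1 w2 : List Char) (st : Int × Int × Option Int × List Char) (i : Nat) :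
    fssStepB s w2.length st (i, fssMatch s w1 i, fssMatch s w2 i) = fssStepA s w1 w2 st i := by
  obtain ⟨a, b, ml, ms⟩ := st
  simp only [fssStepB, fssStepA, fssMatch, decide_eq_true_eq]
  exact fssTail_eq s w2.length _ _ ml ms

-- invariant: once both pointers are set, min_length is ≤ the current candidate length
def fssGood (L2 : Nat) (st : Int × Int × Option Int × List Char) : Prop :=
  st.1 ≠ -1 → st.2.1 ≠ -1 →
    ∃ m, st.2.2.1 = some m ∧ m ≤ max st.1 st.2.1 - min st.1 st.2.1 + (L2 : Int)

lemma fssMl_of_not (len : Int) (ml : Option Int)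
    (h : ¬ ((match ml with | none => true | some m => decide (len < m)) = true)) :
    ∃ m, ml = some m ∧ m ≤ len := by
  cases ml with
  | none => exact absurd rfl h
  | some m => exact ⟨m, rfl, not_lt.mp (fun hlt => h (decide_eq_true hlt))⟩

lemma fssStepA_good (s w1 w2 : List Char) (st : Int × Int × Option Int × List Char) (i : Nat) :
    fssGood w2.length (fssStepA s w1 w2 st i) := by
  obtain ⟨a, b, ml, ms⟩ := st
  simp only [fssStepA, fssGood]
  by_cases hA : (s.drop i).take w1.length = w1 <;>
    by_cases hB : (s.drop i).take w2.length = w2 <;>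
      simp only [hA, hB, if_true, if_false] <;>
        split_ifs with hcond hupd <;>
  first
  | (intro _ _; exact ⟨_, rfl, le_refl _⟩)
  | (intro hx hy; exact absurd ⟨hx, hy⟩ hcond)
  | (intro _ _
     obtain ⟨m, hml, hle⟩ := fssMl_of_not _ ml hupd
     exact ⟨m, hml, hle⟩)

lemma fssStepA_skip (s w1 w2 : List Char) (st : Int × Int × Option Int × List Char) (i : Nat)
    (h : fssGood w2.length st) (h1 : fssMatch s w1 i = false) (h2 : fssMatch s w2 i = false) :
    fssStepA s w1 w2 st i = st := by
  obtain ⟨a, b, ml, ms⟩ := st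
  have hp1 : ¬ ((s.drop i).take w1.length = w1) := by simpa [fssMatch] using h1
  have hp2 : ¬ ((s.drop i).take w2.length = w2) := by simpa [fssMatch] using h2
  simp only [fssStepA, hp1, hp2, if_false]
  split_ifs with hcond hupd
  · exfalso
    obtain ⟨m, hml, hle⟩ := h hcond.1 hcond.2
    simp only at hml
    rw [hml] at hupd
    have := of_decide_eq_true hupd
    simp only at hle
    omega
  · rfl
  · rfl

lemma fss_foldl_filter (s w1 w2 : List Char) (l : List Nat)
    (st : Int × Int × Option Int × List Char) (h : fssGood w2.length st) :
    l.foldl (fssStepA s w1 w2) st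
      = (l.filter (fun i => fssMatch s w1 i || fssMatch s w2 i)).foldl (fssStepA s w1 w2) st := by
  induction l generalizing st with
  | nil => rfl
  | cons i l ih =>
    by_cases hev : (fssMatch s w1 i || fssMatch s w2 i) = true
    · simp only [List.foldl_cons, List.filter_cons, hev, if_true]
      exact ih _ (fssStepA_good s w1 w2 st i)
    · have h1 : fssMatch s w1 i = false := by
        rcases Bool.or_eq_false_iff.mp (by simpa using hev) with ⟨e1, e2⟩; exact e1
      have h2 : fssMatch s w2 i = false := by
        rcases Bool.or_eq_false_iff.mp (by simpa using hev) with ⟨e1, e2⟩; exact e2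
      simp only [List.foldl_cons, List.filter_cons, hev]
      rw [fssStepA_skip s w1 w2 st i h h1 h2]
      exact ih _ h

-- ===== VERDICT (by name: the statement is the Claim_ definition above) =====
theorem find_shortest_subsequence_spec : Claim_equal_find_shortest_subsequence := by
  intro string word1 word2 _
  unfold Spec_find_shortest_subsequence
  simp only [find_shortest_subsequence, find_shortest_subsequence_alt]
  rw [fssOcc_eq, fssOcc_eq]
  have hdrop : ∀ w : List Char,
      (List.range string.toList.length).filter (fun i => decide (0 ≤ i) && fssMatch string.toList w i)
        = (List.range string.toList.length).filter (fun i => fssMatch string.toList w i) := by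
    intro w; apply List.filter_congr; intro j _; simp
  rw [hdrop, hdrop]
  rw [fssMerge_filters (fssMatch string.toList word1.toList) (fssMatch string.toList word2.toList)]
  rw [List.foldl_map]
  have hstep : (fun (st : Int × Int × Option Int × List Char) (i : Nat) =>
      fssStepB string.toList word2.toList.length st (i, fssMatch string.toList word1.toList i, fssMatch string.toList word2.toList i))
      = fssStepA string.toList word1.toList word2.toList := by
    funext st i; exact fssStepB_eq_stepA string.toList word1.toList word2.toList st i
  rw [hstep]
  rw [fss_foldl_filter string.toList word1.toList word2.toList (List.range string.toList.length)
    (-1, -1, none, []) (fun hne _ => absurd rfl hne)]
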